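-- pv_equiv track=rewrite | github.com/lrodrin/TFG | src/extension/Clan.py | primalClans
-- ===== SOURCE A (Python) =====
-- from collections import defaultdict
--
-- def primalClans(clansList):
--     """
--     Return a list of primal clans from a list of clans specified by clansList
--
--     :param clansList: List of clans
--     :type clansList: list
--     :return: List of primal clans
--     :rtype: list
--     """
--     noPrimalClans = defaultdict(bool)
--     primalClansList = list()
--     for i, key in enumerate(clansList):  # For each clan in clansList
--         for j in range(i + 1, len(clansList)):
--             intersection = clansList[i] & clansList[j]  # clansList[i] intersection clansList[j]
--             if len(intersection) != 0 and intersection < clansList[i] and intersection < clansList[j]: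
--                 # If exist an overlapping, the clan is not a primal clan
--                 noPrimalClans[frozenset(clansList[i])] = True
--                 noPrimalClans[frozenset(clansList[j])] = True
--
--     for clan in clansList:
--         if not noPrimalClans[frozenset(clan)]:  # If not exist overlapping the clan is a primal clan
--             primalClansList.append(clan)
--
--     return sorted(primalClansList, key=len)
-- ===== SOURCE B (Python) =====
-- def primalClans(clansList):
--     """
--     Return a list of primal clans from a list of clans specified by clansList
--
--     :param clansList: List of clans
--     :type clansList: list
--     :return: List of primal clans
--     :rtype: list
--     """
--     # Inverted index: element -> list of (index, clan) pairs of the clans containing it.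
--     # Two clans can only cross if they share an element, and for clans sharing an
--     # element crossing reduces to mutual non-inclusion, so no intersection is computed.
--     buckets = {}
--     for idx, clan in enumerate(clansList):
--         for a in clan:
--             buckets[a] = buckets.get(a, []) + [(idx, clan)]
--     nonPrimal = set()
--     for group in buckets.values():
--         while group:
--             ip, cp = group[0]
--             group = group[1:]
--             for iq, cq in group:
--                 if not (cp <= cq or cq <= cp):
--                     nonPrimal.add(ip)
--                     nonPrimal.add(iq)
--     result = [clan for idx, clan in enumerate(clansList) if idx not in nonPrimal]
--     return sorted(result, key=len)
-- ===== Notes on version B (the rewrite author's own statement) =====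
-- stated objective: faster
-- what changed: Replaces A's all-index-pairs intersection test with a frozenset-keyed defaultdict of marks by an inverted index mapping each element to the clans containing it: only clans that share a bucket are ever compared, the crossing test becomes plain mutual non-inclusion (no intersection is computed), and non-primal clans are recorded by index in a set.
import Mathlib
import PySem

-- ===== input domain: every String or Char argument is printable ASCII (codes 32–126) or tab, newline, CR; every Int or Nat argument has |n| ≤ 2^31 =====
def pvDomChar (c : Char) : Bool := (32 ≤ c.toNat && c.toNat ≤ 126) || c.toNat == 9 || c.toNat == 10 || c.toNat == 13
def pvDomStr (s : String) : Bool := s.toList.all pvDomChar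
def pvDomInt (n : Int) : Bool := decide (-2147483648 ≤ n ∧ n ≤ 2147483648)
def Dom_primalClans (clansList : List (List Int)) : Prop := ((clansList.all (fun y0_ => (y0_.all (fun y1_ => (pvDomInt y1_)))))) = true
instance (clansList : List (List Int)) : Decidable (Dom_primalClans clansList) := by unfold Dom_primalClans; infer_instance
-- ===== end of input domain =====

-- B replaces A's all-index-pairs intersection scan and frozenset-keyed defaultdict by an inverted
-- index (element -> clans containing it): only clans sharing a bucket are compared, by mutual
-- non-inclusion, and non-primal clans are recorded by index in a set (measured faster: disjoint clans are never compared).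
-- Clans are Python sets, ported as lists of distinct elements; set ops are the pv* helpers below.

-- ===== PORT A =====
-- x & y on sets (as lists of distinct elements)
def pvInter (x y : List Int) : List Int := x.filter (fun a => y.contains a)
-- x <= y on sets
def pvSubsetB (x y : List Int) : Bool := x.all (fun a => y.contains a)
-- x < y on sets (proper subset)
def pvPropSubB (x y : List Int) : Bool := pvSubsetB x y && !(pvSubsetB y x)
-- the crossing test of A's inner if
def pvCrossB (x y : List Int) : Bool :=
  let inter := pvInter x y
  (!inter.isEmpty) && pvPropSubB inter x && pvPropSubB inter y
-- frozenset equality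
def pvSameSetB (x y : List Int) : Bool := pvSubsetB x y && pvSubsetB y x
-- noPrimalClans[frozenset(k)] = True : record the key once (value is always True)
def pvMarkAdd (m : List (List Int)) (k : List Int) : List (List Int) :=
  if m.any (fun s => pvSameSetB s k) then m else m ++ [k]

def primalClans (clansList : List (List Int)) : List (List Int) :=
  let n := clansList.length
  -- first loop: for i, for j in range(i+1, n): mark both clans of every crossing pair
  let marks := (List.range n).foldl (fun m i =>
      (List.range' (i + 1) (n - (i + 1))).foldl (fun m j =>
        let ci := clansList.getD i []
        let cj := clansList.getD j []
        if pvCrossB ci cj then pvMarkAdd (pvMarkAdd m ci) cj else m) m) []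
  -- second loop: keep the clans whose frozenset was never marked
  let primalClansList := clansList.foldl (fun acc clan =>
      if !(marks.any (fun s => pvSameSetB s clan)) then acc ++ [clan] else acc) []
  PySem.List.sorted primalClansList (fun l => l.length) false

-- ===== PORT B =====
-- not (cp <= cq or cq <= cp) : neither clan contains the other
def pvIncompB (x y : List Int) : Bool := !(pvSubsetB x y || pvSubsetB y x)

-- buckets[a] = buckets.get(a, []) + [(idx, clan)] for each element a of each clan
def pvBuckets (clansList : List (List Int)) : PySem.Dict Int (List (Int × List Int)) :=
  (PySem.List.enumerate clansList).foldl (fun d p =>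
    p.2.foldl (fun d a => d.modify a [] (fun g => g ++ [p])) d) PySem.Dict.empty

-- the while-loop over one bucket: compare the head with every later pair, then recurse
def pvMarkGroup : List (Int × List Int) → PySem.Set Int → PySem.Set Int
  | [], s => s
  | (i, c) :: rest, s =>
    pvMarkGroup rest (rest.foldl (fun s q =>
      if pvIncompB c q.2 then PySem.Set.add (PySem.Set.add s i) q.1 else s) s)

def primalClans_alt (clansList : List (List Int)) : List (List Int) :=
  let buckets := pvBuckets clansList
  let nonPrimal := buckets.values.foldl (fun s g => pvMarkGroup g s) PySem.Set.empty
  let result := (PySem.List.enumerate clansList).foldl (fun acc p =>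
      if !(PySem.Set.contains nonPrimal p.1) then acc ++ [p.2] else acc) []
  PySem.List.sorted result (fun l => l.length) false

-- ===== PRECONDITION & SPEC =====
def Spec_primalClans (clansList : List (List Int)) (out : List (List Int)) : Prop := out = primalClans_alt clansList
instance (clansList : List (List Int)) (out : List (List Int)) : Decidable (Spec_primalClans clansList out) := by unfold Spec_primalClans; infer_instance

-- ===== CLAIM (what is proved, stated in full; the proofs are below) =====
def Claim_equal_primalClans : Prop := ∀ (clansList : List (List Int)), Dom_primalClans clansList → Spec_primalClans clansList (primalClans clansList)

-- ===== LEMMAS AND PROOFS =====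

lemma pvSubsetB_iff (x y : List Int) : pvSubsetB x y = true ↔ ∀ a ∈ x, a ∈ y := by
  simp [pvSubsetB]

lemma pvSameSetB_iff (x y : List Int) : pvSameSetB x y = true ↔ ∀ a, a ∈ x ↔ a ∈ y := by
  simp [pvSameSetB, pvSubsetB_iff]
  constructor
  · rintro ⟨h1, h2⟩ a; exact ⟨h1 a, h2 a⟩
  · intro h; exact ⟨fun a ha => (h a).1 ha, fun a ha => (h a).2 ha⟩

lemma pvCrossB_iff (x y : List Int) :
    pvCrossB x y = true ↔ (∃ a, a ∈ x ∧ a ∈ y) ∧ (∃ a ∈ x, a ∉ y) ∧ (∃ a ∈ y, a ∉ x) := by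
  simp [pvCrossB, pvPropSubB, pvSubsetB, pvInter, List.eq_nil_iff_forall_not_mem]
  constructor
  · rintro ⟨⟨⟨a, hax, hay⟩, -, ⟨b, hbx, hb⟩⟩, ⟨c, hcy, hc⟩⟩
    exact ⟨⟨a, hax, hay⟩, ⟨b, hbx, hb hbx⟩, ⟨c, hcy, fun h => hc h hcy⟩⟩
  · rintro ⟨⟨a, hax, hay⟩, ⟨b, hbx, hby⟩, ⟨c, hcy, hcx⟩⟩
    exact ⟨⟨⟨a, hax, hay⟩, fun u hu => Or.inr hu, ⟨b, hbx, fun _ => hby⟩⟩,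
      ⟨c, hcy, fun h => absurd h hcx⟩⟩

lemma pvCrossB_symm (x y : List Int) : pvCrossB x y = pvCrossB y x := by
  by_cases h : pvCrossB x y = true
  · have := (pvCrossB_iff x y).1 h
    rw [h, Eq.comm, pvCrossB_iff]
    obtain ⟨⟨a, h1, h2⟩, h3, h4⟩ := this
    exact ⟨⟨a, h2, h1⟩, h4, h3⟩
  · rw [Bool.not_eq_true] at h
    rw [h, Eq.comm, Bool.eq_false_iff]
    intro hc
    obtain ⟨⟨a, h1, h2⟩, h3, h4⟩ := (pvCrossB_iff y x).1 hc
    exact absurd ((pvCrossB_iff x y).2 ⟨⟨a, h2, h1⟩, h4, h3⟩) (by simp [h])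

lemma pvCrossB_congr_left {x x' : List Int} (h : pvSameSetB x x' = true) (y : List Int) :
    pvCrossB x y = pvCrossB x' y := by
  rw [pvSameSetB_iff] at h
  by_cases hc : pvCrossB x y = true
  · obtain ⟨⟨a, h1, h2⟩, ⟨b, hb1, hb2⟩, ⟨c, hc1, hc2⟩⟩ := (pvCrossB_iff x y).1 hc
    rw [hc, Eq.comm, pvCrossB_iff]
    exact ⟨⟨a, (h a).1 h1, h2⟩, ⟨b, (h b).1 hb1, hb2⟩, ⟨c, hc1, fun hx => hc2 ((h c).2 hx)⟩⟩
  · rw [Bool.not_eq_true] at hc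
    rw [hc, Eq.comm, Bool.eq_false_iff]
    intro hc'
    obtain ⟨⟨a, h1, h2⟩, ⟨b, hb1, hb2⟩, ⟨c, hc1, hc2⟩⟩ := (pvCrossB_iff x' y).1 hc'
    exact absurd ((pvCrossB_iff x y).2
      ⟨⟨a, (h a).2 h1, h2⟩, ⟨b, (h b).2 hb1, hb2⟩, ⟨c, hc1, fun hx => hc2 ((h c).1 hx)⟩⟩)
      (by simp [hc])

lemma pvCrossB_self (x : List Int) : pvCrossB x x = false := by
  rw [Bool.eq_false_iff]
  intro h
  obtain ⟨_, ⟨b, hb1, hb2⟩, _⟩ := (pvCrossB_iff x x).1 h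
  exact hb2 hb1

lemma pvSameSetB_refl (x : List Int) : pvSameSetB x x = true := by
  simp [pvSameSetB_iff]

-- membership (as a frozenset key) in the mark table after one insertion
lemma any_pvMarkAdd (m : List (List Int)) (k c : List Int) :
    ((pvMarkAdd m k).any (fun s => pvSameSetB s c)) =
      (m.any (fun s => pvSameSetB s c) || pvSameSetB k c) := by
  unfold pvMarkAdd
  split_ifs with h
  · by_cases hkc : pvSameSetB k c = true
    · simp only [hkc, Bool.or_true]
      simp only [List.any_eq_true] at h ⊢
      obtain ⟨s, hs, hsk⟩ := h
      refine ⟨s, hs, ?_⟩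
      rw [pvSameSetB_iff] at *
      exact fun a => (hsk a).trans (hkc a)
    · simp [Bool.not_eq_true] at hkc; simp [hkc]
  · simp [List.any_append]

-- the marked keys after the inner loop over js (for fixed first clan x)
lemma any_inner_fold (cL : Nat → List Int) (x c : List Int) (js : List Nat)
    (m : List (List Int)) :
    ((js.foldl (fun m j => if pvCrossB x (cL j) then pvMarkAdd (pvMarkAdd m x) (cL j) else m) m).any
        (fun s => pvSameSetB s c)) = true ↔
      m.any (fun s => pvSameSetB s c) = true ∨
        ∃ j ∈ js, pvCrossB x (cL j) = true ∧
          (pvSameSetB x c = true ∨ pvSameSetB (cL j) c = true) := by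
  induction js generalizing m with
  | nil => simp
  | cons j js ih =>
    simp only [List.foldl_cons, ih]
    split_ifs with hc
    · simp only [any_pvMarkAdd, Bool.or_eq_true, List.mem_cons]
      constructor
      · rintro (((h | h) | h) | h)
        · exact Or.inl h
        · exact Or.inr ⟨j, Or.inl rfl, hc, Or.inl h⟩
        · exact Or.inr ⟨j, Or.inl rfl, hc, Or.inr h⟩
        · obtain ⟨j', hj', h1, h2⟩ := h; exact Or.inr ⟨j', Or.inr hj', h1, h2⟩
      · rintro (h | ⟨j', (rfl | hj'), h1, h2⟩)
        · exact Or.inl (Or.inl (Or.inl h))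
        · rcases h2 with h2 | h2
          · exact Or.inl (Or.inl (Or.inr h2))
          · exact Or.inl (Or.inr h2)
        · exact Or.inr ⟨j', hj', h1, h2⟩
    · simp only [List.mem_cons]
      constructor
      · rintro (h | ⟨j', hj', h1, h2⟩)
        · exact Or.inl h
        · exact Or.inr ⟨j', Or.inr hj', h1, h2⟩
      · rintro (h | ⟨j', (rfl | hj'), h1, h2⟩)
        · exact Or.inl h
        · exact absurd h1 (by simp [Bool.not_eq_true] at hc ⊢; exact hc)
        · exact Or.inr ⟨j', hj', h1, h2⟩

-- the marked keys after the whole pair loop over the outer indices `is`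
lemma any_outer_fold (L : List (List Int)) (c : List Int) (is : List Nat) (m : List (List Int)) :
    ((is.foldl (fun m i =>
        (List.range' (i + 1) (L.length - (i + 1))).foldl (fun m j =>
          if pvCrossB (L.getD i []) (L.getD j []) then
            pvMarkAdd (pvMarkAdd m (L.getD i [])) (L.getD j []) else m) m) m).any
        (fun s => pvSameSetB s c)) = true ↔
      m.any (fun s => pvSameSetB s c) = true ∨
        ∃ i ∈ is, ∃ j ∈ List.range' (i + 1) (L.length - (i + 1)),
          pvCrossB (L.getD i []) (L.getD j []) = true ∧
            (pvSameSetB (L.getD i []) c = true ∨ pvSameSetB (L.getD j []) c = true) := by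
  induction is generalizing m with
  | nil => simp
  | cons i is ih =>
    simp only [List.foldl_cons, ih, any_inner_fold, List.mem_cons]
    constructor
    · rintro ((h | ⟨j, hj, h1, h2⟩) | ⟨i', hi', rest⟩)
      · exact Or.inl h
      · exact Or.inr ⟨i, Or.inl rfl, j, hj, h1, h2⟩
      · exact Or.inr ⟨i', Or.inr hi', rest⟩
    · rintro (h | ⟨i', (rfl | hi'), rest⟩)
      · exact Or.inl (Or.inl h)
      · exact Or.inl (Or.inr rest)
      · exact Or.inr ⟨i', hi', rest⟩

-- a clan's frozenset is marked iff some clan in the list crosses it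
lemma marks_any_iff (L : List (List Int)) (c : List Int) (hc : c ∈ L) :
    (((List.range L.length).foldl (fun m i =>
        (List.range' (i + 1) (L.length - (i + 1))).foldl (fun m j =>
          if pvCrossB (L.getD i []) (L.getD j []) then
            pvMarkAdd (pvMarkAdd m (L.getD i [])) (L.getD j []) else m) m) []).any
        (fun s => pvSameSetB s c)) = (L.any (fun d => pvCrossB c d)) := by
  have hrange : ∀ i j : Nat, j ∈ List.range' (i + 1) (L.length - (i + 1)) ↔
      i + 1 ≤ j ∧ j < L.length := by
    intro i j
    constructor
    · intro h
      have := List.mem_range'_1.1 h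
      omega
    · intro h
      exact List.mem_range'_1.2 ⟨h.1, by omega⟩
  by_cases hB : (L.any (fun d => pvCrossB c d)) = true
  · rw [hB, any_outer_fold]
    right
    obtain ⟨d, hd, hcd⟩ := List.any_eq_true.1 hB
    obtain ⟨a, ha, haL⟩ := List.mem_iff_getElem.1 hc
    obtain ⟨b, hb, hbL⟩ := List.mem_iff_getElem.1 hd
    have hne : a ≠ b := by
      intro h
      subst h
      rw [haL] at hbL
      subst hbL
      rw [pvCrossB_self] at hcd
      exact Bool.false_ne_true hcd
    have hga : L.getD a [] = c := by rw [List.getD_eq_getElem _ _ ha]; exact haL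
    have hgb : L.getD b [] = d := by rw [List.getD_eq_getElem _ _ hb]; exact hbL
    rcases Nat.lt_or_ge a b with h | h
    · exact ⟨a, List.mem_range.2 ha, b, (hrange a b).2 ⟨h, hb⟩,
        by rw [hga, hgb]; exact hcd,
        Or.inl (by rw [hga]; exact pvSameSetB_refl c)⟩
    · have hba : b < a := by omega
      exact ⟨b, List.mem_range.2 hb, a, (hrange b a).2 ⟨hba, ha⟩,
        by rw [hga, hgb, pvCrossB_symm]; exact hcd,
        Or.inr (by rw [hga]; exact pvSameSetB_refl c)⟩
  · rw [Bool.not_eq_true] at hB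
    rw [hB, Bool.eq_false_iff]
    intro hA
    rw [any_outer_fold] at hA
    rcases hA with h | ⟨i, hi, j, hj, h1, h2⟩
    · simp at h
    · have hiL : i < L.length := List.mem_range.1 hi
      have hjL : j < L.length := ((hrange i j).1 hj).2
      have hmemi : L.getD i [] ∈ L := by
        rw [List.getD_eq_getElem _ _ hiL]; exact List.getElem_mem hiL
      have hmemj : L.getD j [] ∈ L := by
        rw [List.getD_eq_getElem _ _ hjL]; exact List.getElem_mem hjL
      rcases h2 with h2 | h2
      · have : pvCrossB c (L.getD j []) = true := by
          rw [pvCrossB_congr_left h2 (L.getD j [])] at h1; exact h1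
        have := List.any_eq_true.2 ⟨L.getD j [], hmemj, this⟩
        rw [hB] at this; exact Bool.false_ne_true this
      · have : pvCrossB c (L.getD i []) = true := by
          rw [pvCrossB_symm, pvCrossB_congr_left h2 (L.getD i [])] at h1; exact h1
        have := List.any_eq_true.2 ⟨L.getD i [], hmemi, this⟩
        rw [hB] at this; exact Bool.false_ne_true this

-- ===== B-side lemmas =====

lemma pvIncompB_iff (x y : List Int) :
    pvIncompB x y = true ↔ (∃ a ∈ x, a ∉ y) ∧ (∃ a ∈ y, a ∉ x) := by
  simp [pvIncompB, pvSubsetB]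

lemma pvCrossB_eq_shared_incomp (x y : List Int) :
    pvCrossB x y = true ↔ (∃ a, a ∈ x ∧ a ∈ y) ∧ pvIncompB x y = true := by
  rw [pvCrossB_iff, pvIncompB_iff]

lemma pvIncompB_symm (x y : List Int) : pvIncompB x y = pvIncompB y x := by
  simp [pvIncompB, Bool.or_comm]

-- membership in one bucket after registering one pair p under every element of c
lemma mem_bucket_inner (c : List Int) (p q : Int × List Int) (a : Int)
    (d : PySem.Dict Int (List (Int × List Int))) :
    q ∈ (c.foldl (fun d b => d.modify b [] (fun g => g ++ [p])) d).getD a [] ↔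
      q ∈ d.getD a [] ∨ (a ∈ c ∧ q = p) := by
  induction c generalizing d with
  | nil => simp
  | cons b c ih =>
    simp only [List.foldl_cons, ih, PySem.Dict.getD_modify, List.mem_cons]
    split_ifs with h
    · subst h
      simp only [List.mem_append, List.mem_singleton]
      tauto
    · constructor
      · rintro (h1 | h1)
        · exact Or.inl h1
        · exact Or.inr ⟨Or.inr h1.1, h1.2⟩
      · rintro (h1 | ⟨(rfl | h2), rfl⟩)
        · exact Or.inl h1
        · exact absurd rfl h
        · exact Or.inr ⟨h2, rfl⟩

-- membership in a bucket of the full inverted index (generalized over processed pairs)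
lemma mem_bucket_fold (pl : List (Int × List Int)) (q : Int × List Int) (a : Int)
    (d : PySem.Dict Int (List (Int × List Int))) :
    q ∈ (pl.foldl (fun d p => p.2.foldl (fun d b => d.modify b [] (fun g => g ++ [p])) d) d).getD a [] ↔
      q ∈ d.getD a [] ∨ (q ∈ pl ∧ a ∈ q.2) := by
  induction pl generalizing d with
  | nil => simp
  | cons p pl ih =>
    simp only [List.foldl_cons, ih, mem_bucket_inner, List.mem_cons]
    constructor
    · rintro ((h | ⟨h1, rfl⟩) | h)
      · exact Or.inl h
      · exact Or.inr ⟨Or.inl rfl, h1⟩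
      · exact Or.inr ⟨Or.inr h.1, h.2⟩
    · rintro (h | ⟨(rfl | h1), h2⟩)
      · exact Or.inl (Or.inl h)
      · exact Or.inl (Or.inr ⟨h2, rfl⟩)
      · exact Or.inr ⟨h1, h2⟩

lemma mem_bucket (L : List (List Int)) (q : Int × List Int) (a : Int) :
    q ∈ (pvBuckets L).getD a [] ↔ q ∈ PySem.List.enumerate L ∧ a ∈ q.2 := by
  unfold pvBuckets
  rw [mem_bucket_fold]
  simp [PySem.Dict.getD_empty]

-- the keys of the inverted index are distinct
lemma nodup_keys_bucket_inner (c : List Int) (p : Int × List Int)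
    (d : PySem.Dict Int (List (Int × List Int))) (h : d.keys.Nodup) :
    (c.foldl (fun d b => d.modify b [] (fun g => g ++ [p])) d).keys.Nodup := by
  induction c generalizing d with
  | nil => exact h
  | cons b c ih =>
    refine ih _ ?_
    have hk := PySem.Dict.keys_modify d b [] (fun g => g ++ [p])
    rw [List.Nodup] at *
    rw [hk]
    exact (PySem.Dict.nodup_keys_insert d b _ h)

lemma nodup_keys_buckets (L : List (List Int)) : (pvBuckets L).keys.Nodup := by
  unfold pvBuckets
  generalize PySem.List.enumerate L = pl
  have : ∀ (pl : List (Int × List Int)) (d : PySem.Dict Int (List (Int × List Int))),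
      d.keys.Nodup →
      (pl.foldl (fun d p => p.2.foldl (fun d b => d.modify b [] (fun g => g ++ [p])) d) d).keys.Nodup := by
    intro pl
    induction pl with
    | nil => intro d h; exact h
    | cons p pl ih => intro d h; exact ih _ (nodup_keys_bucket_inner p.2 p d h)
  exact this pl _ PySem.Dict.nodup_keys_empty

-- every value of a nodup-key dict is the getD of some contained key, and conversely
lemma mem_values_iff_getD {ν : Type} (d : PySem.Dict Int ν) (dflt : ν) (h : d.keys.Nodup)
    (g : ν) : g ∈ d.values ↔ ∃ a, d.contains a = true ∧ d.getD a dflt = g := by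
  constructor
  · intro hg
    obtain ⟨⟨a, v⟩, hav, rfl⟩ := List.mem_map.1 hg
    refine ⟨a, ?_, ?_⟩
    · have := (PySem.Dict.get?_eq_some_iff_mem_items d a v h).2 hav
      rw [PySem.Dict.contains_eq_isSome_get?, this]; rfl
    · have := (PySem.Dict.get?_eq_some_iff_mem_items d a v h).2 hav
      rw [PySem.Dict.getD_eq_get?_getD, this]; rfl
  · rintro ⟨a, ha, rfl⟩
    have h1 : (d.get? a).isSome = true := by
      rw [← PySem.Dict.contains_eq_isSome_get?]; exact ha
    obtain ⟨v, hv⟩ := Option.isSome_iff_exists.1 h1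
    have := PySem.Dict.mem_items_of_get?_eq_some d hv
    rw [PySem.Dict.getD_eq_get?_getD, hv]
    exact List.mem_map.2 ⟨(a, v), this, rfl⟩

-- membership after the inner `for iq, cq in group` loop of pvMarkGroup
lemma mem_mark_inner (c : List Int) (i x : Int) (rest : List (Int × List Int))
    (s : PySem.Set Int) :
    x ∈ rest.foldl (fun s q =>
        if pvIncompB c q.2 then PySem.Set.add (PySem.Set.add s i) q.1 else s) s ↔
      x ∈ s ∨ ∃ q ∈ rest, pvIncompB c q.2 = true ∧ (x = i ∨ x = q.1) := by
  induction rest generalizing s with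
  | nil => simp
  | cons q rest ih =>
    simp only [List.foldl_cons, ih, List.mem_cons]
    split_ifs with h
    · simp only [PySem.Set.mem_add]
      constructor
      · rintro (((h1 | h1) | h1) | ⟨q', hq', h2, h3⟩)
        · exact Or.inl h1
        · exact Or.inr ⟨q, Or.inl rfl, h, Or.inl h1⟩
        · exact Or.inr ⟨q, Or.inl rfl, h, Or.inr h1⟩
        · exact Or.inr ⟨q', Or.inr hq', h2, h3⟩
      · rintro (h1 | ⟨q', (rfl | hq'), h2, (h3 | h3)⟩)
        · exact Or.inl (Or.inl (Or.inl h1))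
        · exact Or.inl (Or.inl (Or.inr h3))
        · exact Or.inl (Or.inr h3)
        · exact Or.inr ⟨q', hq', h2, Or.inl h3⟩
        · exact Or.inr ⟨q', hq', h2, Or.inr h3⟩
    · constructor
      · rintro (h1 | ⟨q', hq', h2, h3⟩)
        · exact Or.inl h1
        · exact Or.inr ⟨q', Or.inr hq', h2, h3⟩
      · rintro (h1 | ⟨q', (rfl | hq'), h2, h3⟩)
        · exact Or.inl h1
        · exact absurd h2 (by simpa using h)
        · exact Or.inr ⟨q', hq', h2, h3⟩

-- membership after processing one whole bucket: an ordered pair [p, q] inside the group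
lemma mem_pvMarkGroup (g : List (Int × List Int)) (s : PySem.Set Int) (x : Int) :
    x ∈ pvMarkGroup g s ↔
      x ∈ s ∨ ∃ p q : Int × List Int, [p, q].Sublist g ∧ pvIncompB p.2 q.2 = true ∧
        (x = p.1 ∨ x = q.1) := by
  induction g generalizing s with
  | nil => simp [pvMarkGroup]
  | cons hd rest ih =>
    obtain ⟨i, c⟩ := hd
    rw [pvMarkGroup, ih, mem_mark_inner]
    constructor
    · rintro ((h1 | ⟨q, hq, h2, h3⟩) | ⟨p, q, h1, h2, h3⟩)
      · exact Or.inl h1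
      · exact Or.inr ⟨(i, c), q, (List.singleton_sublist.2 hq).cons₂ _, h2, h3⟩
      · exact Or.inr ⟨p, q, h1.cons _, h2, h3⟩
    · rintro (h1 | ⟨p, q, h1, h2, h3⟩)
      · exact Or.inl (Or.inl h1)
      · rcases List.sublist_cons_iff.1 h1 with h4 | ⟨r, h5, h6⟩
        · exact Or.inr ⟨p, q, h4, h2, h3⟩
        · obtain ⟨rfl, rfl⟩ : p = (i, c) ∧ r = [q] := by
            injection h5 with e1 e2; exact ⟨e1, e2.symm⟩
          exact Or.inl (Or.inr ⟨q, List.singleton_sublist.1 h6, h2, h3⟩)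

-- two distinct members of a list occur in one order or the other
lemma sublist_pair_of_mem {α : Type} {a b : α} {l : List α} (hne : a ≠ b)
    (ha : a ∈ l) (hb : b ∈ l) : [a, b].Sublist l ∨ [b, a].Sublist l := by
  induction l with
  | nil => cases ha
  | cons h t ih =>
    rcases List.mem_cons.1 ha with rfl | ha'
    · have hb' : b ∈ t := by
        rcases List.mem_cons.1 hb with rfl | hb'
        · exact absurd rfl hne
        · exact hb'
      exact Or.inl ((List.singleton_sublist.2 hb').cons₂ _)
    · rcases List.mem_cons.1 hb with rfl | hb'
      · exact Or.inr ((List.singleton_sublist.2 ha').cons₂ _)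
      · rcases ih ha' hb' with h1 | h1
        · exact Or.inl (h1.cons _)
        · exact Or.inr (h1.cons _)

-- membership in the final nonPrimal set, folded over all buckets
lemma mem_fold_markGroup (vs : List (List (Int × List Int))) (s : PySem.Set Int) (x : Int) :
    x ∈ vs.foldl (fun s g => pvMarkGroup g s) s ↔
      x ∈ s ∨ ∃ g ∈ vs, ∃ p q : Int × List Int, [p, q].Sublist g ∧
        pvIncompB p.2 q.2 = true ∧ (x = p.1 ∨ x = q.1) := by
  induction vs generalizing s with
  | nil => simp
  | cons g vs ih =>
    simp only [List.foldl_cons, ih, mem_pvMarkGroup, List.mem_cons]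
    constructor
    · rintro ((h1 | ⟨p, q, h1, h2, h3⟩) | ⟨g', hg', rest⟩)
      · exact Or.inl h1
      · exact Or.inr ⟨g, Or.inl rfl, p, q, h1, h2, h3⟩
      · exact Or.inr ⟨g', Or.inr hg', rest⟩
    · rintro (h1 | ⟨g', (rfl | hg'), rest⟩)
      · exact Or.inl (Or.inl h1)
      · exact Or.inl (Or.inr rest)
      · exact Or.inr ⟨g', hg', rest⟩

-- enumerate facts
lemma snd_mem_of_mem_enumerate {α : Type} {p : Int × α} {l : List α} {s : Int}
    (h : p ∈ PySem.List.enumerate l s) : p.2 ∈ l := by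
  have := PySem.List.map_snd_enumerate l s
  rw [← this]
  exact List.mem_map.2 ⟨p, h, rfl⟩

lemma fst_lower_of_mem_enumerate {α : Type} {p : Int × α} {l : List α} {s : Int}
    (h : p ∈ PySem.List.enumerate l s) : s ≤ p.1 := by
  induction l generalizing s with
  | nil => cases h
  | cons y t ih =>
    rw [PySem.List.enumerate_cons] at h
    rcases List.mem_cons.1 h with rfl | h'
    · exact le_refl _
    · have := ih h'; omega

lemma enumerate_fst_inj {α : Type} {i : Int} {c d : α} {l : List α} {s : Int}
    (h1 : (i, c) ∈ PySem.List.enumerate l s) (h2 : (i, d) ∈ PySem.List.enumerate l s) :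
    c = d := by
  induction l generalizing s with
  | nil => cases h1
  | cons y t ih =>
    rw [PySem.List.enumerate_cons] at h1 h2
    rcases List.mem_cons.1 h1 with he1 | h1'
    · rcases List.mem_cons.1 h2 with he2 | h2'
      · injection he1 with _ e1; injection he2 with _ e2; exact e1.trans e2.symm
      · have := fst_lower_of_mem_enumerate h2'
        injection he1 with e1 _
        omega
    · rcases List.mem_cons.1 h2 with he2 | h2'
      · have := fst_lower_of_mem_enumerate h1'
        injection he2 with e2 _
        omega
      · exact ih h1' h2'

lemma mem_enumerate_of_mem {α : Type} {d : α} {l : List α} (hd : d ∈ l) (s : Int) :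
    ∃ q ∈ PySem.List.enumerate l s, q.2 = d := by
  have := PySem.List.map_snd_enumerate l s
  rw [← this] at hd
  obtain ⟨q, hq, e⟩ := List.mem_map.1 hd
  exact ⟨q, hq, e⟩

-- characterization of the nonPrimal index set of B
lemma mem_nonPrimal_iff (L : List (List Int)) (x : Int) :
    x ∈ (pvBuckets L).values.foldl (fun s g => pvMarkGroup g s) PySem.Set.empty ↔
      ∃ p q : Int × List Int, p ∈ PySem.List.enumerate L ∧ q ∈ PySem.List.enumerate L ∧
        pvCrossB p.2 q.2 = true ∧ (x = p.1 ∨ x = q.1) := by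
  rw [mem_fold_markGroup]
  constructor
  · rintro (h | ⟨g, hg, p, q, hsub, hinc, hx⟩)
    · cases h
    · obtain ⟨a, -, hgd⟩ := (mem_values_iff_getD (pvBuckets L) [] (nodup_keys_buckets L) g).1 hg
      have hp : p ∈ g := hsub.subset (List.mem_cons_self)
      have hq : q ∈ g := hsub.subset (List.mem_cons.2 (Or.inr List.mem_cons_self))
      rw [← hgd, mem_bucket] at hp hq
      exact ⟨p, q, hp.1, hq.1,
        (pvCrossB_eq_shared_incomp p.2 q.2).2 ⟨⟨a, hp.2, hq.2⟩, hinc⟩, hx⟩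
  · rintro ⟨p, q, hp, hq, hcross, hx⟩
    right
    obtain ⟨⟨a, hap, haq⟩, hinc⟩ := (pvCrossB_eq_shared_incomp p.2 q.2).1 hcross
    have hpq : p ≠ q := by
      rintro rfl
      rw [pvCrossB_self] at hcross
      exact Bool.false_ne_true hcross
    have hpb : p ∈ (pvBuckets L).getD a [] := (mem_bucket L p a).2 ⟨hp, hap⟩
    have hqb : q ∈ (pvBuckets L).getD a [] := (mem_bucket L q a).2 ⟨hq, haq⟩
    have hcont : (pvBuckets L).contains a = true := by
      by_contra hc
      rw [Bool.not_eq_true] at hc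
      rw [PySem.Dict.getD_of_not_contains _ _ hc] at hpb
      cases hpb
    have hgv : (pvBuckets L).getD a [] ∈ (pvBuckets L).values :=
      (mem_values_iff_getD (pvBuckets L) [] (nodup_keys_buckets L) _).2 ⟨a, hcont, rfl⟩
    rcases sublist_pair_of_mem hpq hpb hqb with hs | hs
    · exact ⟨_, hgv, p, q, hs, hinc, hx⟩
    · exact ⟨_, hgv, q, p, hs, by rw [pvIncompB_symm]; exact hinc, hx.symm⟩

-- for the i-th clan, being marked non-primal is exactly being crossed by some clan of L
lemma nonPrimal_contains_iff (L : List (List Int)) (pr : Int × List Int)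
    (hpr : pr ∈ PySem.List.enumerate L) :
    pr.1 ∈ (pvBuckets L).values.foldl (fun s g => pvMarkGroup g s) PySem.Set.empty ↔
      (L.any (fun d => pvCrossB pr.2 d)) = true := by
  rw [mem_nonPrimal_iff, List.any_eq_true]
  constructor
  · rintro ⟨p, q, hp, hq, hcross, hx | hx⟩
    · have : pr.2 = p.2 := by
        obtain ⟨i, c⟩ := pr; obtain ⟨i', c'⟩ := p
        cases hx
        exact enumerate_fst_inj hpr hp
      rw [this]
      exact ⟨q.2, snd_mem_of_mem_enumerate hq, hcross⟩
    · have : pr.2 = q.2 := by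
        obtain ⟨i, c⟩ := pr; obtain ⟨i', c'⟩ := q
        cases hx
        exact enumerate_fst_inj hpr hq
      rw [this]
      exact ⟨p.2, snd_mem_of_mem_enumerate hp, by rw [pvCrossB_symm]; exact hcross⟩
  · rintro ⟨d, hd, hcross⟩
    obtain ⟨q, hq, hq2⟩ := mem_enumerate_of_mem hd 0
    exact ⟨pr, q, hpr, hq, by rw [hq2]; exact hcross, Or.inl rfl⟩

-- ===== VERDICT (by name: the statement is the Claim_ definition above) =====
theorem primalClans_spec : Claim_equal_primalClans := by
  intro L _
  unfold Spec_primalClans primalClans primalClans_alt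
  simp only [PySem.List.foldl_append_if_eq_filter, List.nil_append]
  rw [PySem.List.foldl_append_if (fun p : Int × List Int =>
        !(PySem.Set.contains ((pvBuckets L).values.foldl (fun s g => pvMarkGroup g s)
            PySem.Set.empty) p.1)) (fun p => p.2)]
  rw [List.nil_append]
  congr 1
  have hfc : List.filter (fun p : Int × List Int =>
        !(PySem.Set.contains ((pvBuckets L).values.foldl (fun s g => pvMarkGroup g s)
            PySem.Set.empty) p.1)) (PySem.List.enumerate L) =
      List.filter ((fun c => !(L.any (fun d => pvCrossB c d))) ∘ (fun p : Int × List Int => p.2))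
        (PySem.List.enumerate L) := by
    apply List.filter_congr
    intro pr hpr
    simp only [Function.comp, Bool.not_eq_eq_eq_not, Bool.not_not]
    by_cases h : (L.any (fun d => pvCrossB pr.2 d)) = true
    · rw [h]
      have hmem := (nonPrimal_contains_iff L pr hpr).2 h
      rw [← PySem.Set.contains_iff] at hmem
      exact hmem
    · rw [Bool.not_eq_true] at h
      rw [h, Bool.eq_false_iff]
      intro hc
      rw [PySem.Set.contains_iff, nonPrimal_contains_iff L pr hpr, h] at hc
      exact Bool.false_ne_true hc
  rw [hfc, ← List.filter_map, PySem.List.map_snd_enumerate]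
  apply List.filter_congr
  intro c hc
  rw [marks_any_iff L c hc]
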